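-- pv_equiv track=rewrite | github.com/evanwilliams02/CSP-Solvers-Analysis | Crossword/crossword_backtrack.py | get_horizontal_seqs
-- ===== SOURCE A (Python) =====
-- def get_horizontal_seqs(row, row_index):
--         sequences = []
--         current_sequence = []
--         for i, val in enumerate(row):
--             if val == 1:
--                 current_sequence.append((row_index, i))
--             elif current_sequence:
--                 sequences.append(current_sequence)
--                 current_sequence = []
--         if current_sequence:
--             sequences.append(current_sequence)
--         return sequences
-- ===== SOURCE B (Python) =====
-- def get_horizontal_seqs(row, row_index):
--     seqs = []
--     i = 0
--     n = len(row)
--     while i < n: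
--         if row[i] == 1:
--             j = i + 1
--             while j < n and row[j] == 1:
--                 j += 1
--             seqs.append([(row_index, k) for k in range(i, j)])
--             i = j
--         else:
--             i += 1
--     return seqs
-- ===== Notes on version B (the rewrite author's own statement) =====
-- stated objective: alternative
-- what changed: Replaces A's single pass with a running current_sequence accumulator and a post-loop flush by a run-scanner: an outer loop finds the start of each run of 1s, an inner scan finds its end, and the whole segment is emitted at once as a range comprehension.
import Mathlib
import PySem

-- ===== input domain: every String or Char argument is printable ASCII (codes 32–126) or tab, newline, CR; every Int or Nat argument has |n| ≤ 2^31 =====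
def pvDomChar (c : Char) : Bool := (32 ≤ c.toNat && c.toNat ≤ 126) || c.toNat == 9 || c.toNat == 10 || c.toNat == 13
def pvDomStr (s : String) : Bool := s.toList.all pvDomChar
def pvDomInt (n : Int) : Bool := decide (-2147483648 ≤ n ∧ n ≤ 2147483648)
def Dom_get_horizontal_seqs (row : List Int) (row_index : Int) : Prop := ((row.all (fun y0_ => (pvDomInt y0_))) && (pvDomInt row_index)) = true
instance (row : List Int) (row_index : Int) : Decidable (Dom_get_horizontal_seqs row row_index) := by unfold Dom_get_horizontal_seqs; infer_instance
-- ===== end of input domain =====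

-- B replaces A's running-accumulator single pass by a run-scanner (find each run of 1s, emit it whole); alternative decomposition, same cost.


-- ===== PORT A =====
-- literal port of A: fold over enumerate(row) carrying (sequences, current_sequence), then flush
def get_horizontal_seqs (row : List Int) (row_index : Int) : List (List (Int × Int)) :=
  let st := (PySem.List.enumerate row 0).foldl
    (fun (st : List (List (Int × Int)) × List (Int × Int)) (p : Int × Int) =>
      if p.2 == 1 then (st.1, st.2 ++ [(row_index, p.1)])
      else if st.2.isEmpty then st else (st.1 ++ [st.2], []))
    ([], [])
  if st.2.isEmpty then st.1 else st.1 ++ [st.2]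

-- ===== PORT B =====
-- outer while: find a 1 at position i; inner while (takeWhile) scans the rest of the run; emit range(i, j)
def pvAltGo (r : Int) : List Int → Int → List (List (Int × Int))
  | [], _ => []
  | x :: xs, i =>
    if x == 1 then
      ((PySem.List.pyRange i (i + (xs.takeWhile (fun v => v == 1)).length + 1) 1).map (fun k => (r, k)))
        :: pvAltGo r (xs.dropWhile (fun v => v == 1)) (i + (xs.takeWhile (fun v => v == 1)).length + 1)
    else pvAltGo r xs (i + 1)
  termination_by xs _ => xs.length
  decreasing_by
  · exact Nat.lt_succ_of_le (List.length_dropWhile_le _ _)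
  · exact Nat.lt_succ_self _

def get_horizontal_seqs_alt (row : List Int) (row_index : Int) : List (List (Int × Int)) :=
  pvAltGo row_index row 0

-- ===== PRECONDITION & SPEC =====
def Spec_get_horizontal_seqs (row : List Int) (row_index : Int) (out : List (List (Int × Int))) : Prop := out = get_horizontal_seqs_alt row row_index
instance (row : List Int) (row_index : Int) (out : List (List (Int × Int))) : Decidable (Spec_get_horizontal_seqs row row_index out) := by unfold Spec_get_horizontal_seqs; infer_instance

-- ===== CLAIM (what is proved, stated in full; the proofs are below) =====
def Claim_equal_get_horizontal_seqs : Prop := ∀ (row : List Int) (row_index : Int), Dom_get_horizontal_seqs row row_index → Spec_get_horizontal_seqs row row_index (get_horizontal_seqs row row_index)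

-- ===== LEMMAS AND PROOFS =====

-- recursive characterisation of A's loop state: extend cur through xs starting at column n
def pvExt (r : Int) : List (Int × Int) → List Int → Int → List (List (Int × Int))
  | cur, [], _ => if cur.isEmpty then [] else [cur]
  | cur, x :: xs, n =>
    if x == 1 then pvExt r (cur ++ [(r, n)]) xs (n + 1)
    else if cur.isEmpty then pvExt r [] xs (n + 1)
    else cur :: pvExt r [] xs (n + 1)

theorem pvExt_foldl (r : Int) (xs : List Int) :
    ∀ (n : Int) (seqs : List (List (Int × Int))) (cur : List (Int × Int)),
    (let st := (PySem.List.enumerate xs n).foldl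
        (fun (st : List (List (Int × Int)) × List (Int × Int)) (p : Int × Int) =>
          if p.2 == 1 then (st.1, st.2 ++ [(r, p.1)])
          else if st.2.isEmpty then st else (st.1 ++ [st.2], []))
        (seqs, cur)
     if st.2.isEmpty then st.1 else st.1 ++ [st.2]) = seqs ++ pvExt r cur xs n := by
  induction xs with
  | nil => intro n seqs cur; simp only [PySem.List.enumerate_nil, List.foldl_nil, pvExt]; split <;> simp
  | cons x xs ih =>
    intro n seqs cur
    rw [PySem.List.enumerate_cons]
    simp only [List.foldl_cons]
    by_cases hx : (x == 1) = true
    · rw [if_pos hx, pvExt, if_pos hx]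
      exact ih (n + 1) seqs (cur ++ [(r, n)])
    · rw [if_neg hx, pvExt, if_neg hx]
      by_cases hc : cur.isEmpty = true
      · have hc' : cur = [] := by simpa using hc
        subst hc'
        rw [if_pos hc, if_pos hc]
        exact ih (n + 1) seqs []
      · rw [if_neg hc, if_neg hc]
        rw [ih (n + 1) (seqs ++ [cur]) []]
        simp

-- pvExt with empty accumulator is B's run-scanner; with nonempty accumulator it prepends the
-- accumulator extended by the leading run
theorem pvExt_altGo (r : Int) (xs : List Int) :
    (∀ n : Int, pvExt r [] xs n = pvAltGo r xs n) ∧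
    (∀ (n : Int) (cur : List (Int × Int)), ¬ cur.isEmpty →
      pvExt r cur xs n =
        (cur ++ (PySem.List.pyRange n (n + (xs.takeWhile (fun v => v == 1)).length) 1).map (fun k => (r, k)))
          :: pvAltGo r (xs.dropWhile (fun v => v == 1)) (n + (xs.takeWhile (fun v => v == 1)).length)) := by
  induction xs with
  | nil =>
    constructor
    · intro n; simp [pvExt, pvAltGo]
    · intro n cur hc
      simp [pvExt, pvAltGo, hc, PySem.List.pyRange_one_eq_nil (le_refl n)]
  | cons x xs ih =>
    obtain ⟨ihP, ihQ⟩ := ih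
    have hQ : ∀ (n : Int) (cur : List (Int × Int)), ¬ cur.isEmpty = true →
        pvExt r cur (x :: xs) n =
          (cur ++ (PySem.List.pyRange n (n + ((x :: xs).takeWhile (fun v => v == 1)).length) 1).map (fun k => (r, k)))
            :: pvAltGo r ((x :: xs).dropWhile (fun v => v == 1)) (n + ((x :: xs).takeWhile (fun v => v == 1)).length) := by
      intro n cur hc
      by_cases hx : (x == 1) = true
      · have htw : (x :: xs).takeWhile (fun v => v == 1) = x :: xs.takeWhile (fun v => v == 1) := by
          simp [hx]
        have hdw : (x :: xs).dropWhile (fun v => v == 1) = xs.dropWhile (fun v => v == 1) := by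
          simp [hx]
        rw [pvExt, if_pos hx, ihQ (n + 1) (cur ++ [(r, n)]) (by simp), htw, hdw]
        have hlen : (n + (((x :: xs.takeWhile (fun v => v == 1)).length : Nat) : Int)) =
            (n + 1) + (((xs.takeWhile (fun v => v == 1)).length : Nat) : Int) := by
          push_cast [List.length_cons]; ring
        rw [hlen]
        congr 1
        rw [PySem.List.pyRange_one_cons (show n < (n + 1) + (((xs.takeWhile (fun v => v == 1)).length : Nat) : Int) by omega)]
        simp
      · have htw : (x :: xs).takeWhile (fun v => v == 1) = [] := by simp [hx]
        have hdw : (x :: xs).dropWhile (fun v => v == 1) = x :: xs := by simp [hx]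
        rw [pvExt, if_neg hx, if_neg hc, htw, hdw]
        simp only [List.length_nil, Nat.cast_zero, add_zero,
          PySem.List.pyRange_one_eq_nil (le_refl n), List.map_nil, List.append_nil]
        congr 1
        rw [ihP (n + 1)]
        conv_rhs => rw [pvAltGo]
        rw [if_neg hx]
    refine ⟨?_, hQ⟩
    intro n
    by_cases hx : (x == 1) = true
    · rw [pvExt, if_pos hx, List.nil_append, ihQ (n + 1) [(r, n)] (by simp), pvAltGo, if_pos hx]
      have hdw : (x :: xs).dropWhile (fun v => v == 1) = xs.dropWhile (fun v => v == 1) := by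
        simp [hx]
      have hlen : n + (((xs.takeWhile (fun v => v == 1)).length : Nat) : Int) + 1 =
          (n + 1) + (((xs.takeWhile (fun v => v == 1)).length : Nat) : Int) := by ring
      rw [hlen]
      congr 1
      rw [PySem.List.pyRange_one_cons (show n < (n + 1) + (((xs.takeWhile (fun v => v == 1)).length : Nat) : Int) by omega)]
      simp
    · rw [pvExt, if_neg hx, if_pos (by rfl), ihP (n + 1), pvAltGo, if_neg hx]

-- ===== VERDICT (by name: the statement is the Claim_ definition above) =====
theorem get_horizontal_seqs_spec : Claim_equal_get_horizontal_seqs := by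
  intro row row_index _
  unfold Spec_get_horizontal_seqs get_horizontal_seqs get_horizontal_seqs_alt
  rw [pvExt_foldl row_index row 0 [] []]
  simpa using (pvExt_altGo row_index row).1 0
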